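-- pv_equiv track=rewrite | github.com/volkb79-2/netcup-api-filter | ui_tests/tests/test_security.py | _split_header_values
-- ===== SOURCE A (Python) =====
-- def _split_header_values(header_value: str) -> list[str]:
--     # Playwright may return multiple header instances joined by newlines.
--     # Also tolerate comma-joined values.
--     values: list[str] = []
--     for line in (header_value or "").splitlines():
--         for part in line.split(","):
--             value = part.strip()
--             if value:
--                 values.append(value)
--     return values
-- ===== SOURCE B (Python) =====
-- def _split_header_values(header_value: str) -> list[str]:
--     # Single pass: a tiny scanner over the characters; comma and the
--     # line-break characters are all treated as separators, tokens are
--     # stripped and kept when non-empty.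
--     seps = ",\n\r\x0b\x0c\x1c\x1d\x1e\x85\u2028\u2029"
--     values: list[str] = []
--     token: list[str] = []
--     for ch in (header_value or ""):
--         if ch in seps:
--             value = "".join(token).strip()
--             if value:
--                 values.append(value)
--             token = []
--         else:
--             token.append(ch)
--     value = "".join(token).strip()
--     if value:
--         values.append(value)
--     return values
-- ===== Notes on version B (the rewrite author's own statement) =====
-- stated objective: alternative
-- what changed: B replaces A's nested splitlines-then-comma-split passes by a single character-level scan that flushes a stripped token at every separator (comma or line-break character); it trades the library split calls for one explicit accumulator loop.
import Mathlib
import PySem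

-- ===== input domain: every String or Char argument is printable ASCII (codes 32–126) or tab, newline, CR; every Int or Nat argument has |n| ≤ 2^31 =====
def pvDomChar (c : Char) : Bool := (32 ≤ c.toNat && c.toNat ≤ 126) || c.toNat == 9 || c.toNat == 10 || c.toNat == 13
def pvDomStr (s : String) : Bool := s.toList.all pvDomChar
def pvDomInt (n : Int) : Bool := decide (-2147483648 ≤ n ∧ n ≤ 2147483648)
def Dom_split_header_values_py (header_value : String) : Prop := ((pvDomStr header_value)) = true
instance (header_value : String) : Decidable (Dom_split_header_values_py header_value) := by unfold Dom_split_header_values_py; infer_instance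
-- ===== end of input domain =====

-- B replaces A's nested splitlines-then-comma split by a single character-level
-- scan that flushes a stripped token at every separator (objective: alternative one-pass decomposition).

-- ===== PORT A =====
def split_header_values_py (header_value : String) : List String :=
  (PySem.Str.splitlines (if header_value == "" then "" else header_value)).foldl
    (fun values line =>
      ((PySem.Str.split? line ",").getD []).foldl
        (fun values part =>
          let value := PySem.Str.strip part
          if value ≠ "" then values ++ [value] else values)
        values)
    []

-- ===== PORT B =====
-- the separator characters of Source B: comma plus everything str.splitlines breaks on
def pvSeps : List Char := [',', '\n', '\x0d', '\x0b', '\x0c', '\x1c', '\x1d', '\x1e', '\x85', '\u2028', '\u2029']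

def pvFlush (values : List String) (token : List Char) : List String :=
  let value := PySem.Str.strip (String.ofList token)
  if value ≠ "" then values ++ [value] else values

def split_header_values_py_alt (header_value : String) : List String :=
  let st := (if header_value == "" then "" else header_value).toList.foldl
    (fun (st : List String × List Char) ch =>
      if pvSeps.contains ch then (pvFlush st.1 st.2, []) else (st.1, st.2 ++ [ch]))
    ([], [])
  pvFlush st.1 st.2

-- ===== PRECONDITION & SPEC =====
def Spec_split_header_values_py (header_value : String) (out : List String) : Prop := out = split_header_values_py_alt header_value
instance (header_value : String) (out : List String) : Decidable (Spec_split_header_values_py header_value out) := by unfold Spec_split_header_values_py; infer_instance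

-- ===== CLAIM (what is proved, stated in full; the proofs are below) =====
def Claim_equal_split_header_values_py : Prop := ∀ (header_value : String), Dom_split_header_values_py header_value → Spec_split_header_values_py header_value (split_header_values_py header_value)

-- ===== LEMMAS AND PROOFS =====

-- the break predicate hidden inside PySem.Chars.splitlines
def pvIsBreak (c : Char) : Bool :=
  decide (c.toNat = 10) || decide (c.toNat = 13) || decide (c.toNat = 11) || decide (c.toNat = 12) ||
  decide (c.toNat = 28) || decide (c.toNat = 29) || decide (c.toNat = 30) || decide (c.toNat = 133) ||
  decide (c.toNat = 8232) || decide (c.toNat = 8233)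

def pvModHd (c : Char) : List (List Char) → List (List Char)
  | [] => [[c]]
  | h :: t => (c :: h) :: t

def pvConsHd (pre : List Char) : List (List Char) → List (List Char)
  | [] => if pre.isEmpty then [] else [pre]
  | h :: t => (pre ++ h) :: t

def pvLines : List Char → List (List Char)
  | [] => []
  | c :: rest =>
    if c = '\x0d' ∧ rest.head? = some '\n' then [] :: pvLines rest.tail
    else if pvIsBreak c then [] :: pvLines rest else pvModHd c (pvLines rest)
termination_by cs => cs.length
decreasing_by
  · simp only [List.length_cons]; cases rest <;> simp
  · simp
  · simp

-- strip the pieces, keep the non-empty ones (the common normal form of both sides)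
def pvG (ls : List (List Char)) : List String :=
  (ls.map (fun l => String.ofList (PySem.Chars.strip l))).filter (· ≠ "")

def pvH (ls : List (List Char)) : List (List Char) :=
  ls.flatMap (List.splitOnP (· == ','))

theorem pvG_append (a b : List (List Char)) : pvG (a ++ b) = pvG a ++ pvG b := by
  simp [pvG]

theorem pvG_nil_cons (t : List (List Char)) : pvG ([] :: t) = pvG t := by
  simp [pvG, PySem.Chars.strip, PySem.Chars.lstrip, PySem.Chars.rstrip]

theorem pvConsHd_nil (ls : List (List Char)) : pvConsHd [] ls = ls := by
  cases ls <;> simp [pvConsHd]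

theorem pvG_cons (x : List Char) (t : List (List Char)) : pvG (x :: t) = pvG [x] ++ pvG t := by
  simp only [pvG, List.map_cons, List.map_nil, List.filter_cons, List.filter_nil]
  by_cases h : String.ofList (PySem.Chars.strip x) = "" <;> simp [h]

theorem pvModifyHead_nil_append (l : List (List Char)) : List.modifyHead (fun x => [] ++ x) l = l := by
  cases l <;> simp

theorem pvModifyHead_id (l : List (List Char)) : List.modifyHead (fun x => x) l = l := by
  cases l <;> simp

theorem pvFlush_eq (values : List String) (token : List Char) :
    pvFlush values token = values ++ pvG [token] := by
  by_cases h : PySem.Chars.strip token = []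
  · simp [pvFlush, pvG, PySem.Str.strip, h]
  · have hne : String.ofList (PySem.Chars.strip token) ≠ "" := by simpa using h
    simp [pvFlush, pvG, PySem.Str.strip, hne]

theorem pvLines_go (n : ℕ) (cs : List Char) (hn : cs.length ≤ n) (cur : List Char) (acc : List (List Char)) :
    PySem.Chars.splitlines.go pvIsBreak cs cur acc = acc.reverse ++ pvConsHd cur.reverse (pvLines cs) := by
  induction n generalizing cs cur acc with
  | zero =>
    rw [List.length_eq_zero_iff.mp (Nat.le_zero.mp hn)]
    rw [PySem.Chars.splitlines.go.eq_def, pvLines]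
    by_cases h : cur.isEmpty <;> simp_all [pvConsHd, List.isEmpty_iff]
  | succ n ih =>
    rw [PySem.Chars.splitlines.go.eq_def]
    split
    · -- cs = []
      rw [pvLines]
      by_cases h : cur.isEmpty <;> simp_all [pvConsHd, List.isEmpty_iff]
    · -- cs = CR :: LF :: rest
      rename_i rest
      rw [ih rest (by simp at hn; omega)]
      simp only [List.reverse_nil, pvConsHd_nil]
      rw [show pvLines ('\x0d' :: '\n' :: rest) = [] :: pvLines rest by rw [pvLines]; simp]
      simp [pvConsHd]
    · -- cs = c :: rest, not the CRLF case
      rename_i c rest hne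
      have hcrlf : ¬ (c = '\x0d' ∧ rest.head? = some '\n') := by
        rintro ⟨rfl, hh⟩
        cases rest with
        | nil => simp at hh
        | cons d rest' =>
          simp at hh
          exact hne rest' rfl (by rw [hh])
      have hlen : rest.length ≤ n := by simp at hn; omega
      by_cases hb : pvIsBreak c
      · rw [if_pos hb, ih rest hlen]
        simp only [List.reverse_nil, pvConsHd_nil]
        rw [show pvLines (c :: rest) = [] :: pvLines rest by rw [pvLines]; rw [if_neg hcrlf, if_pos hb]]
        simp [pvConsHd]
      · rw [if_neg (by simp [hb]), ih rest hlen]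
        rw [show pvLines (c :: rest) = pvModHd c (pvLines rest) by rw [pvLines]; rw [if_neg hcrlf, if_neg (by simp [hb])]]
        cases pvLines rest <;> simp [pvConsHd, pvModHd]

theorem splitlines_eq_pvLines (cs : List Char) : PySem.Chars.splitlines cs = pvLines cs := by
  rw [show PySem.Chars.splitlines cs = PySem.Chars.splitlines.go pvIsBreak cs [] [] from rfl]
  rw [pvLines_go cs.length cs le_rfl]
  simp [pvConsHd_nil]

theorem splitOn_go_comma (fuel : ℕ) (l : List Char) (hf : l.length < fuel) (cur : List Char) (acc : List (List Char)) :
    PySem.Chars.splitOn.go [','] fuel l cur acc =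
      acc.reverse ++ List.modifyHead (cur.reverse ++ ·) (List.splitOnP (· == ',') l) := by
  induction fuel generalizing l cur acc with
  | zero => omega
  | succ fuel ih =>
    rw [PySem.Chars.splitOn.go.eq_def]
    split
    · omega
    · simp [List.splitOnP_nil]
    · rename_i fuelp c rest heq
      obtain rfl : fuelp = fuel := by omega
      rw [List.splitOnP_cons]
      by_cases hc : c = ','
      · subst hc
        rw [if_pos (by simp [List.isPrefixOf])]
        simp only [List.length_cons, List.length_nil, List.drop_succ_cons, List.drop_zero]
        rw [ih rest (by simp at hf; omega)]
        simp [pvModifyHead_id]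
      · rw [if_neg (by simp [List.isPrefixOf, Ne.symm hc]), ih rest (by simp at hf; omega)]
        rw [if_neg (by simp [hc])]
        rcases h : List.splitOnP (· == ',') rest with _ | ⟨hd, tl⟩
        · exact absurd h (List.splitOnP_ne_nil _ _)
        · simp

theorem splitOn_comma (l : List Char) :
    PySem.Chars.splitOn l [','] = List.splitOnP (· == ',') l := by
  rw [show PySem.Chars.splitOn l [','] = PySem.Chars.splitOn.go [','] (l.length + 1) l [] [] from rfl]
  rw [splitOn_go_comma (l.length + 1) l (by omega)]
  rcases h : List.splitOnP (· == ',') l with _ | ⟨hd, tl⟩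
  · exact absurd h (List.splitOnP_ne_nil _ _)
  · simp

theorem foldl_flush_str (l : List String) (acc : List String) :
    l.foldl (fun values part =>
        let value := PySem.Str.strip part
        if value ≠ "" then values ++ [value] else values) acc
      = acc ++ (l.map PySem.Str.strip).filter (· ≠ "") := by
  induction l generalizing acc with
  | nil => simp
  | cons h t ih => by_cases hh : PySem.Str.strip h ≠ "" <;> simp_all

-- A collapses to the normal form over splitlines-then-comma pieces
theorem a_eq_aux (ls : List (List Char)) (acc : List String) :
    (ls.map String.ofList).foldl
      (fun values line =>
        ((PySem.Str.split? line ",").getD []).foldl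
          (fun values part =>
            let value := PySem.Str.strip part
            if value ≠ "" then values ++ [value] else values)
          values)
      acc
    = acc ++ pvG (pvH ls) := by
  induction ls generalizing acc with
  | nil => simp [pvH, pvG]
  | cons line rest ih =>
    simp only [List.map_cons, List.foldl_cons]
    rw [show PySem.Str.split? (String.ofList line) ","
          = some ((PySem.Chars.splitOn line [',']).map String.ofList) from by
        simp [PySem.Str.split?, PySem.Chars.split?, String.toList_ofList]]
    rw [Option.getD_some, foldl_flush_str, ih, splitOn_comma]
    rw [show pvH (line :: rest) = List.splitOnP (· == ',') line ++ pvH rest from by simp [pvH]]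
    rw [pvG_append, ← List.append_assoc]
    congr 1
    simp [pvG, PySem.Str.strip, String.toList_ofList, List.filter_map, Function.comp_def]

theorem a_eq (hv : String) :
    split_header_values_py hv = pvG (pvH (pvLines (if hv == "" then "" else hv).toList)) := by
  unfold split_header_values_py
  generalize (if hv == "" then "" else hv) = s
  rw [show PySem.Str.splitlines s = (PySem.Chars.splitlines s.toList).map String.ofList from rfl]
  rw [splitlines_eq_pvLines, a_eq_aux]
  simp

-- B collapses to the normal form over the single split
theorem b_fold (cs : List Char) (values : List String) (token : List Char) :
    (let st := cs.foldl
        (fun (st : List String × List Char) ch =>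
          if pvSeps.contains ch then (pvFlush st.1 st.2, []) else (st.1, st.2 ++ [ch]))
        (values, token)
     pvFlush st.1 st.2)
      = values ++ pvG (List.modifyHead (token ++ ·) (List.splitOnP (pvSeps.contains ·) cs)) := by
  induction cs generalizing values token with
  | nil =>
    simp only [List.foldl_nil, List.splitOnP_nil, List.modifyHead_cons, List.append_nil]
    exact pvFlush_eq values token
  | cons c rest ih =>
    simp only [List.foldl_cons]
    by_cases hc : pvSeps.contains c
    · rw [if_pos hc, ih, List.splitOnP_cons, if_pos hc, List.modifyHead_cons, pvFlush_eq,
        List.append_nil, pvModifyHead_nil_append]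
      conv_rhs => rw [pvG_cons]
      rw [List.append_assoc]
    · rw [if_neg hc, ih, List.splitOnP_cons, if_neg hc]
      rcases h : List.splitOnP (pvSeps.contains ·) rest with _ | ⟨hd, tl⟩
      · exact absurd h (List.splitOnP_ne_nil _ _)
      · simp

theorem b_eq (hv : String) :
    split_header_values_py_alt hv = pvG (List.splitOnP (pvSeps.contains ·) (if hv == "" then "" else hv).toList) := by
  unfold split_header_values_py_alt
  rw [b_fold]
  rcases h : List.splitOnP (pvSeps.contains ·) (if hv == "" then "" else hv).toList with _ | ⟨hd, tl⟩
  · exact absurd h (List.splitOnP_ne_nil _ _)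
  · simp

-- per-character facts on the domain
theorem pv_toNat_inj {a b : Char} (h : a.toNat = b.toNat) : a = b := by
  apply Char.ext
  exact UInt32.toNat_inj.mp h

theorem dom_p (c : Char) (h : pvDomChar c = true) :
    pvSeps.contains c = ((c == ',') || pvIsBreak c) := by
  by_cases h1 : c = ','
  · subst h1; decide
  by_cases h2 : c = '\n'
  · subst h2; decide
  by_cases h3 : c = '\x0d'
  · subst h3; decide
  have hL : pvSeps.contains c = false := by
    simp only [pvSeps, List.contains_eq_mem, decide_eq_false_iff_not, List.mem_cons,
      List.not_mem_nil, or_false]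
    rintro (rfl | rfl | rfl | rfl | rfl | rfl | rfl | rfl | rfl | rfl | rfl) <;>
      first
        | exact h1 rfl
        | exact h2 rfl
        | exact h3 rfl
        | exact absurd h (by decide)
  have hn10 : c.toNat ≠ 10 := fun hh => h2 (pv_toNat_inj hh)
  have hn13 : c.toNat ≠ 13 := fun hh => h3 (pv_toNat_inj hh)
  have hR : pvIsBreak c = false := by
    simp only [pvIsBreak, Bool.or_eq_false_iff, decide_eq_false_iff_not]
    simp only [pvDomChar] at h
    simp only [Bool.or_eq_true, Bool.and_eq_true, decide_eq_true_eq, beq_iff_eq] at h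
    refine ⟨⟨⟨⟨⟨⟨⟨⟨⟨hn10, hn13⟩, ?_⟩, ?_⟩, ?_⟩, ?_⟩, ?_⟩, ?_⟩, ?_⟩, ?_⟩ <;> omega
  rw [hL, hR]
  simp [h1]

theorem pvLines_ne_nil (d : Char) (r : List Char) : pvLines (d :: r) ≠ [] := by
  rw [pvLines]
  split_ifs
  · simp
  · simp
  · cases pvLines r <;> simp [pvModHd]

-- combining the head/tail pair into equality of the normal forms
theorem pvG_of_pair (S T : List (List Char)) (hS : S ≠ [])
    (h1 : S.headD [] = T.headD []) (h2 : pvG S.tail = pvG T.tail) : pvG S = pvG T := by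
  rcases S with _ | ⟨s, St⟩
  · exact absurd rfl hS
  rcases T with _ | ⟨t, Tt⟩
  · simp only [List.headD_cons, List.headD_nil] at h1
    simp only [List.tail_cons, List.tail_nil] at h2
    subst h1
    rw [pvG_nil_cons]
    simpa using h2
  · simp only [List.headD_cons] at h1
    simp only [List.tail_cons] at h2
    subst h1
    conv_lhs => rw [pvG_cons]
    conv_rhs => rw [pvG_cons]
    rw [h2]

-- the crux: on the domain both normal forms agree (heads equal, tails pvG-equal)
theorem phi (n : ℕ) (cs : List Char) (hn : cs.length ≤ n) (hdom : cs.all pvDomChar) :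
    (List.splitOnP (pvSeps.contains ·) cs).headD [] = (pvH (pvLines cs)).headD [] ∧
    pvG ((List.splitOnP (pvSeps.contains ·) cs).tail) = pvG ((pvH (pvLines cs)).tail) := by
  induction n generalizing cs with
  | zero =>
    rw [List.length_eq_zero_iff.mp (Nat.le_zero.mp hn)]
    simp [pvLines, pvH, List.splitOnP_nil]
  | succ n ih =>
    rcases cs with _ | ⟨c, rest⟩
    · simp [pvLines, pvH, List.splitOnP_nil]
    rw [List.all_cons, Bool.and_eq_true] at hdom
    have hdc : pvDomChar c = true := hdom.1
    have hdr : rest.all pvDomChar = true := hdom.2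
    have hlen : rest.length ≤ n := by simp at hn; omega
    have crux_rest : pvG (List.splitOnP (pvSeps.contains ·) rest) = pvG (pvH (pvLines rest)) := by
      obtain ⟨p1, p2⟩ := ih rest hlen hdr
      exact pvG_of_pair _ _ (List.splitOnP_ne_nil _ _) p1 p2
    by_cases hcr : c = '\x0d' ∧ rest.head? = some '\n'
    · obtain ⟨rfl, hh⟩ := hcr
      rcases rest with _ | ⟨d, rest'⟩
      · simp at hh
      simp only [List.head?_cons, Option.some.injEq] at hh
      subst hh
      rw [show pvLines ('\x0d' :: '\n' :: rest') = [] :: pvLines rest' from by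
        rw [pvLines]; simp]
      rw [show List.splitOnP (pvSeps.contains ·) ('\x0d' :: '\n' :: rest')
            = [] :: [] :: List.splitOnP (pvSeps.contains ·) rest' from by
        rw [List.splitOnP_cons, if_pos (by decide), List.splitOnP_cons, if_pos (by decide)]]
      rw [show pvH ([] :: pvLines rest') = [] :: pvH (pvLines rest') from by
        simp [pvH, List.splitOnP_nil]]
      refine ⟨rfl, ?_⟩
      simp only [List.tail_cons]
      rw [pvG_nil_cons]
      have hdr' : rest'.all pvDomChar = true := by
        rw [List.all_cons, Bool.and_eq_true] at hdr; exact hdr.2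
      obtain ⟨p1, p2⟩ := ih rest' (by simp at hn; omega) hdr'
      exact pvG_of_pair _ _ (List.splitOnP_ne_nil _ _) p1 p2
    · by_cases hb : pvIsBreak c = true
      · rw [show pvLines (c :: rest) = [] :: pvLines rest from by
          rw [pvLines]; rw [if_neg hcr, if_pos hb]]
        rw [show List.splitOnP (pvSeps.contains ·) (c :: rest)
              = [] :: List.splitOnP (pvSeps.contains ·) rest from by
          rw [List.splitOnP_cons, if_pos (by rw [dom_p c hdc, hb]; simp)]]
        rw [show pvH ([] :: pvLines rest) = [] :: pvH (pvLines rest) from by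
          simp [pvH, List.splitOnP_nil]]
        exact ⟨rfl, by simpa using crux_rest⟩
      · by_cases hc : c = ','
        · subst hc
          rw [show List.splitOnP (pvSeps.contains ·) (',' :: rest)
                = [] :: List.splitOnP (pvSeps.contains ·) rest from by
            rw [List.splitOnP_cons, if_pos (by decide)]]
          rw [show pvLines (',' :: rest) = pvModHd ',' (pvLines rest) from by
            rw [pvLines]; rw [if_neg hcr, if_neg hb]]
          rcases hl : pvLines rest with _ | ⟨h, t⟩
          · have hrest : rest = [] := by
              rcases rest with _ | ⟨d, r⟩
              · rfl
              · exact absurd hl (pvLines_ne_nil d r)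
            subst hrest
            refine ⟨rfl, ?_⟩
            simp [pvH, pvModHd, List.splitOnP_nil, List.splitOnP_cons, pvG, PySem.Chars.strip,
              PySem.Chars.lstrip, PySem.Chars.rstrip]
          · rw [show pvH (pvModHd ',' (h :: t)) = [] :: pvH (h :: t) from by
              simp [pvH, pvModHd, List.splitOnP_cons]]
            refine ⟨rfl, ?_⟩
            simp only [List.tail_cons]
            rw [← hl]
            exact crux_rest
        · -- c is an ordinary character
          have hpc : pvSeps.contains c = false := by
            rw [dom_p c hdc]
            simp [hc, hb]
          rw [show pvLines (c :: rest) = pvModHd c (pvLines rest) from by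
            rw [pvLines]; rw [if_neg hcr, if_neg hb]]
          rw [List.splitOnP_cons, hpc]
          simp only [Bool.false_eq_true, if_false]
          rcases hS : List.splitOnP (pvSeps.contains ·) rest with _ | ⟨s, St⟩
          · exact absurd hS (List.splitOnP_ne_nil _ _)
          rcases hl : pvLines rest with _ | ⟨h, t⟩
          · have hrest : rest = [] := by
              rcases rest with _ | ⟨d, r⟩
              · rfl
              · exact absurd hl (pvLines_ne_nil d r)
            subst hrest
            rw [List.splitOnP_nil] at hS
            obtain ⟨rfl, rfl⟩ : s = [] ∧ St = [] := by
              constructor <;> injection hS with h1 h2 <;> simp_all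
            refine ⟨?_, ?_⟩ <;>
              simp [pvH, pvModHd, List.splitOnP_cons, List.splitOnP_nil, hc]
          · obtain ⟨p1, p2⟩ := ih rest hlen hdr
            rw [hS, hl] at p1 p2
            rcases hsc : List.splitOnP (· == ',') h with _ | ⟨hc1, tc1⟩
            · exact absurd hsc (List.splitOnP_ne_nil _ _)
            have hH : pvH (h :: t) = hc1 :: (tc1 ++ pvH t) := by
              simp [pvH, hsc]
            rw [hH] at p1 p2
            simp only [List.headD_cons, List.tail_cons] at p1 p2
            subst p1
            rw [show pvH (pvModHd c (h :: t)) = (c :: s) :: (tc1 ++ pvH t) from by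
              simp [pvH, pvModHd, List.splitOnP_cons, hc, hsc]]
            simp only [List.modifyHead_cons, List.headD_cons, List.tail_cons]
            exact ⟨by trivial, p2⟩

theorem crux (cs : List Char) (hdom : cs.all pvDomChar) :
    pvG (List.splitOnP (pvSeps.contains ·) cs) = pvG (pvH (pvLines cs)) := by
  obtain ⟨h1, h2⟩ := phi cs.length cs le_rfl hdom
  rcases hs : List.splitOnP (pvSeps.contains ·) cs with _ | ⟨hd, tl⟩
  · exact absurd hs (List.splitOnP_ne_nil _ _)
  rw [hs] at h1 h2
  rcases hh : pvH (pvLines cs) with _ | ⟨hd', tl'⟩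
  · rw [hh] at h1 h2
    simp only [List.headD_cons, List.headD_nil] at h1
    simp only [List.tail_cons, List.tail_nil] at h2
    subst h1
    rw [pvG_nil_cons]
    simpa using h2
  · rw [hh] at h1 h2
    simp only [List.headD_cons] at h1
    simp only [List.tail_cons] at h2
    subst h1
    conv_lhs => rw [pvG_cons]
    conv_rhs => rw [pvG_cons]
    rw [h2]

-- ===== VERDICT (by name: the statement is the Claim_ definition above) =====
theorem split_header_values_py_spec : Claim_equal_split_header_values_py := by
  intro hv hdom
  unfold Spec_split_header_values_py
  have hdom' : (if hv == "" then "" else hv).toList.all pvDomChar := by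
    by_cases h : hv == "" <;> simp_all [Dom_split_header_values_py, pvDomStr]
  rw [a_eq, b_eq, crux _ hdom']
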